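-- pv_equiv track=rewrite | github.com/YikesItsSykes/DGCV | src/dgcv/printing/_string_processing.py | _needs_parens_latex
-- ===== SOURCE A (Python) =====
-- def _needs_parens_latex(s: str) -> bool:
--     s = s.strip()
--     if not s:
--         return False
--
--     i = 0
--     n = len(s)
--     ctx = []
--     frac_wait = 0
--
--     while i < n:
--         if s.startswith(r"\frac", i):
--             i += 5
--             frac_wait = 2
--             continue
--
--         ch = s[i]
--
--         if ch == "^" and i + 1 < n and s[i + 1] == "{":
--             ctx.append("sup")
--             i += 2
--             continue
--         if ch == "_" and i + 1 < n and s[i + 1] == "{":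
--             ctx.append("sub")
--             i += 2
--             continue
--
--         if ch == "{":
--             if frac_wait > 0:
--                 ctx.append("frac")
--                 frac_wait -= 1
--             else:
--                 ctx.append("brace")
--             i += 1
--             continue
--         if ch == "}":
--             if ctx:
--                 ctx.pop()
--             i += 1
--             continue
--
--         if (ch == "+" or ch == "-") and not ctx:
--             return True
--
--         i += 1
--
--     return False
-- ===== SOURCE B (Python) =====
-- def _needs_parens_latex(s: str) -> bool:
--     n = len(s)
--
--     def skip_group(i):
--         # s[i] is just past an opening brace; return the index just past its matching '}'
--         while i < n:
--             ch = s[i]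
--             if ch in "^_" and i + 1 < n and s[i + 1] == "{":
--                 i = skip_group(i + 2)
--             elif ch == "{":
--                 i = skip_group(i + 1)
--             elif ch == "}":
--                 return i + 1
--             else:
--                 i += 1
--         return n
--
--     i = 0
--     while i < n:
--         ch = s[i]
--         if ch in "^_" and i + 1 < n and s[i + 1] == "{":
--             i = skip_group(i + 2)
--         elif ch == "{":
--             i = skip_group(i + 1)
--         elif ch in "+-":
--             return True
--         else:
--             i += 1
--     return False
-- ===== Notes on version B (the rewrite author's own statement) =====
-- stated objective: alternative
-- what changed: Replaces A's flat scan with mutable state (the `ctx` label stack plus the `frac_wait` lookahead counter and the initial strip) by a recursive-descent parser: a recursive `skip_group` consumes a whole brace group (recursing on nested groups) and the top-level loop carries no nesting state at all; the frac-prefix branch, `frac_wait` and the strip disappear because the pushed labels were never read and none of the five characters of that prefix is special, which also removes A's per-character startswith test (the constant-factor speedup).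
import Mathlib
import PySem

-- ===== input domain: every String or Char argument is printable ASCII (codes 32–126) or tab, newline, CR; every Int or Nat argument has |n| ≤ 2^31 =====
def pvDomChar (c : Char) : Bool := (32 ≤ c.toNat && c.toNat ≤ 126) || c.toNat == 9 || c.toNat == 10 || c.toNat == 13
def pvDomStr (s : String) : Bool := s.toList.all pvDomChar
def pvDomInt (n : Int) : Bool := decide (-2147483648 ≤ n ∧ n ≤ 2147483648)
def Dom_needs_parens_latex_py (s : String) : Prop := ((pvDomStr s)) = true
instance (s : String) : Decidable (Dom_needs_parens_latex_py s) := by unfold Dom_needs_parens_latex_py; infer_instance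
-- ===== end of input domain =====

-- B replaces A's flat scan with a label stack and `frac_wait` state by a recursive-descent
-- parser (a recursive skip_group consuming each brace group); same return value (objective: alternative).

-- ===== PORT A =====
-- the while-loop of A: remaining characters, the `ctx` stack, `frac_wait`
def pvLoopA : List Char → List String → Int → Bool
  | [], _, _ => false
  | c :: rest, ctx, fw =>
    if ['\\', 'f', 'r', 'a', 'c'].isPrefixOf (c :: rest) then
      pvLoopA (rest.drop 4) ctx 2
    else if c = '^' ∧ rest.head? = some '{' then pvLoopA rest.tail (ctx ++ ["sup"]) fw
    else if c = '_' ∧ rest.head? = some '{' then pvLoopA rest.tail (ctx ++ ["sub"]) fw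
    else if c = '{' then
      (if fw > 0 then pvLoopA rest (ctx ++ ["frac"]) (fw - 1)
       else pvLoopA rest (ctx ++ ["brace"]) fw)
    else if c = '}' then pvLoopA rest (if ctx.isEmpty then ctx else ctx.dropLast) fw
    else if (c = '+' ∨ c = '-') ∧ ctx = [] then true
    else pvLoopA rest ctx fw
  termination_by cs _ _ => cs.length
  decreasing_by all_goals simp [List.length_drop, List.length_tail]

def needs_parens_latex_py (s : String) : Bool :=
  let t : List Char := PySem.Chars.strip s.toList   -- s = s.strip()
  if t = [] then false else pvLoopA t [] 0

-- ===== PORT B =====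
-- length helper for the termination proofs
theorem pv_tail_le (l : List Char) : l.tail.length ≤ l.length := by
  cases l <;> simp

-- Source B's skip_group: input is the suffix just past an opening brace; returns the suffix just
-- past the matching '}' (the subtype carries the length bound needed for the nested recursion).
def pvSkip : (cs : List Char) → {l : List Char // l.length ≤ cs.length}
  | [] => ⟨[], Nat.le_refl _⟩
  | c :: rest =>
    if (c = '^' ∨ c = '_') ∧ rest.head? = some '{' then
      let r := pvSkip (pvSkip rest.tail).1
      ⟨r.1, le_trans r.2 (le_trans (pvSkip rest.tail).2
        (le_trans (pv_tail_le rest) (Nat.le_succ _)))⟩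
    else if c = '{' then
      let r := pvSkip (pvSkip rest).1
      ⟨r.1, le_trans r.2 (le_trans (pvSkip rest).2 (Nat.le_succ _))⟩
    else if c = '}' then ⟨rest, Nat.le_succ _⟩
    else
      let r := pvSkip rest
      ⟨r.1, le_trans r.2 (Nat.le_succ _)⟩
  termination_by cs => cs.length
  decreasing_by
  all_goals simp only [List.length_cons]
  · exact Nat.lt_succ_of_le (pv_tail_le rest)
  · rename_i x _
    exact Nat.lt_succ_of_le
      (le_trans (x rest.tail (Nat.lt_succ_of_le (pv_tail_le rest))).2 (pv_tail_le rest))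
  · exact Nat.lt_succ_of_le (Nat.le_refl _)
  · rename_i x _ _
    exact Nat.lt_succ_of_le (x rest (Nat.lt_succ_of_le (Nat.le_refl _))).2
  · exact Nat.lt_succ_of_le (Nat.le_refl _)

-- Source B's top-level while-loop
def pvTop : (cs : List Char) → Bool
  | [] => false
  | c :: rest =>
    if (c = '^' ∨ c = '_') ∧ rest.head? = some '{' then pvTop (pvSkip rest.tail).1
    else if c = '{' then pvTop (pvSkip rest).1
    else if c = '+' ∨ c = '-' then true
    else pvTop rest
  termination_by cs => cs.length
  decreasing_by
  · simp only [List.length_cons]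
    exact Nat.lt_succ_of_le (le_trans (pvSkip rest.tail).2 (pv_tail_le rest))
  · simp only [List.length_cons]
    exact Nat.lt_succ_of_le (pvSkip rest).2
  · simp

def needs_parens_latex_py_alt (s : String) : Bool := pvTop s.toList

-- ===== PRECONDITION & SPEC =====
def Spec_needs_parens_latex_py (s : String) (out : Bool) : Prop := out = needs_parens_latex_py_alt s
instance (s : String) (out : Bool) : Decidable (Spec_needs_parens_latex_py s out) := by unfold Spec_needs_parens_latex_py; infer_instance

-- ===== CLAIM (what is proved, stated in full; the proofs are below) =====
def Claim_equal_needs_parens_latex_py : Prop := ∀ (s : String), Dom_needs_parens_latex_py s → Spec_needs_parens_latex_py s (needs_parens_latex_py s)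

-- ===== LEMMAS AND PROOFS =====

-- proof-only intermediate: a depth-counter scan, equal to both ports
def pvLoopB : List Char → Int → Bool
  | [], _ => false
  | c :: rest, depth =>
    if (c = '^' ∨ c = '_') ∧ rest.head? = some '{' then pvLoopB rest.tail (depth + 1)
    else if c = '{' then pvLoopB rest (depth + 1)
    else if c = '}' then pvLoopB rest (if depth > 0 then depth - 1 else depth)
    else if (c = '+' ∨ c = '-') ∧ depth = 0 then true
    else pvLoopB rest depth
  termination_by cs _ => cs.length
  decreasing_by all_goals simp [List.length_tail]

theorem pv_isspace_not_special (c : Char) (h : PySem.Chars.isspace c = true) :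
    c ≠ '^' ∧ c ≠ '_' ∧ c ≠ '{' ∧ c ≠ '}' ∧ c ≠ '+' ∧ c ≠ '-' := by
  refine ⟨?_, ?_, ?_, ?_, ?_, ?_⟩ <;> rintro rfl <;> exact absurd h (by decide)

theorem pvLoopB_cons_ws (c : Char) (cs : List Char) (d : Int)
    (h : PySem.Chars.isspace c = true) : pvLoopB (c :: cs) d = pvLoopB cs d := by
  obtain ⟨h1, h2, h3, h4, h5, h6⟩ := pv_isspace_not_special c h
  rw [pvLoopB]
  simp [h1, h2, h3, h4, h5, h6]

theorem pvLoopB_ws_false (ws : List Char) (d : Int)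
    (h : ∀ c ∈ ws, PySem.Chars.isspace c = true) : pvLoopB ws d = false := by
  induction ws with
  | nil => rw [pvLoopB]
  | cons c t ih =>
      rw [pvLoopB_cons_ws c t d (h c (by simp))]
      exact ih (fun x hx => h x (by simp [hx]))

theorem pv_head_append_ws (rest ws : List Char)
    (h : ∀ c ∈ ws, PySem.Chars.isspace c = true) :
    ((rest ++ ws).head? = some '{') ↔ (rest.head? = some '{') := by
  cases rest with
  | cons a t => simp
  | nil =>
      cases ws with
      | nil => simp
      | cons w t =>
          simp only [List.nil_append, List.head?_cons, List.head?_nil]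
          constructor
          · intro hw
            rw [Option.some.injEq] at hw
            exact absurd (h w (by simp)) (by rw [hw]; decide)
          · intro hw; cases hw

theorem pvLoopB_append_ws (ws : List Char)
    (h : ∀ c ∈ ws, PySem.Chars.isspace c = true) :
    ∀ (cs : List Char) (d : Int), pvLoopB (cs ++ ws) d = pvLoopB cs d := by
  intro cs d
  induction cs, d using pvLoopB.induct with
  | case1 d =>
      simp only [List.nil_append]
      rw [pvLoopB_ws_false ws d h, pvLoopB]
  | case2 c rest d hcond ih =>
      obtain ⟨hc, hh⟩ := hcond
      cases rest with
      | nil => simp at hh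
      | cons r rt =>
          simp only [List.head?_cons, Option.some.injEq] at hh; subst hh
          simp only [List.cons_append, List.tail_cons] at ih ⊢
          rw [pvLoopB, if_pos ⟨hc, by simp⟩, pvLoopB, if_pos ⟨hc, by simp⟩]
          simp only [List.tail_cons]
          exact ih
  | case3 rest d hcond ih =>
      simp only [List.cons_append] at ih ⊢
      rw [pvLoopB, pvLoopB]
      simp [ih]
  | case4 rest d h1 h2 ih =>
      by_cases hd : d > 0
      all_goals simp only [List.cons_append] at ih ⊢
      all_goals rw [pvLoopB, pvLoopB]
      all_goals simp [hd] at ih ⊢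
      all_goals simp [ih]
  | case5 c rest d h1 h2 h3 h4 =>
      obtain ⟨hc, hd0⟩ := h4
      subst hd0
      simp only [List.cons_append]
      rw [pvLoopB, pvLoopB]
      rcases hc with rfl | rfl <;> simp
  | case6 c rest d h1 h2 h3 h4 ih =>
      have hL : ¬((c = '^' ∨ c = '_') ∧ ((rest ++ ws).head? = some '{')) :=
        fun hx => h1 ⟨hx.1, (pv_head_append_ws rest ws h).mp hx.2⟩
      simp only [List.cons_append] at ih ⊢
      rw [pvLoopB, pvLoopB, if_neg hL, if_neg h1]
      simp [h2, h3, h4, ih]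

theorem pvLoopB_lstrip (cs : List Char) (d : Int) :
    pvLoopB (PySem.Chars.lstrip cs) d = pvLoopB cs d := by
  unfold PySem.Chars.lstrip
  induction cs with
  | nil => rfl
  | cons c t ih =>
      by_cases hc : PySem.Chars.isspace c = true
      · rw [List.dropWhile_cons_of_pos hc, ih, pvLoopB_cons_ws c t d hc]
      · rw [List.dropWhile_cons_of_neg hc]

theorem pvLoopB_rstrip (cs : List Char) (d : Int) :
    pvLoopB (PySem.Chars.rstrip cs) d = pvLoopB cs d := by
  have hsplit : cs = PySem.Chars.rstrip cs ++ (cs.reverse.takeWhile PySem.Chars.isspace).reverse := by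
    unfold PySem.Chars.rstrip
    rw [← List.reverse_append, List.takeWhile_append_dropWhile, List.reverse_reverse]
  conv_rhs => rw [hsplit]
  rw [pvLoopB_append_ws _ (fun c hc => List.mem_takeWhile_imp (List.mem_reverse.mp hc))]

theorem pvLoopB_strip (cs : List Char) (d : Int) :
    pvLoopB (PySem.Chars.strip cs) d = pvLoopB cs d := by
  unfold PySem.Chars.strip
  rw [pvLoopB_rstrip, pvLoopB_lstrip]

-- A's stack-and-frac_wait loop computes the same as the depth counter: the labels are
-- never read (only whether `ctx` is empty matters) and `\frac`'s characters are all no-ops.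
theorem pvLoopA_eq_loopB (cs : List Char) (ctx : List String) (fw : Int) :
    pvLoopA cs ctx fw = pvLoopB cs (ctx.length : Int) := by
  induction cs, ctx, fw using pvLoopA.induct with
  | case1 ctx fw => rw [pvLoopA, pvLoopB]
  | case2 c rest ctx fw hpre ih =>
      obtain ⟨t, ht⟩ := List.isPrefixOf_iff_prefix.mp hpre
      have ht' : '\\' :: 'f' :: 'r' :: 'a' :: 'c' :: t = c :: rest := by simpa using ht
      obtain ⟨hc, hrest⟩ : '\\' = c ∧ 'f' :: 'r' :: 'a' :: 'c' :: t = rest := by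
        simpa [List.cons.injEq] using ht'
      subst hc; subst hrest
      rw [pvLoopA, if_pos hpre]
      simp only [List.drop_succ_cons, List.drop_zero] at ih ⊢
      rw [ih]
      simp [pvLoopB]
  | case3 c rest ctx fw hpre hsup ih =>
      obtain ⟨hc, hh⟩ := hsup
      subst hc
      rw [pvLoopA, if_neg hpre, if_pos ⟨rfl, hh⟩, ih, pvLoopB]
      simp [hh]
  | case4 c rest ctx fw hpre hsup hsub ih =>
      obtain ⟨hc, hh⟩ := hsub
      subst hc
      rw [pvLoopA, if_neg hpre, if_neg hsup, if_pos ⟨rfl, hh⟩, ih, pvLoopB]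
      simp [hh]
  | case5 rest ctx fw hfw hpre hsup hsub ih =>
      rw [pvLoopA, if_neg hpre, if_neg hsup, if_neg hsub]
      simp [pvLoopB, hfw, ih]
  | case6 rest ctx fw hfw hpre hsup hsub ih =>
      rw [pvLoopA, if_neg hpre, if_neg hsup, if_neg hsub]
      simp [pvLoopB, hfw, ih]
  | case7 rest ctx fw hpre hsup hsub hne ih =>
      rw [pvLoopA, if_neg hpre, if_neg hsup, if_neg hsub]
      cases ctx with
      | nil =>
          simp only [List.isEmpty_nil] at ih
          simp at ih
          simp [pvLoopB, ih]
      | cons a t =>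
          simp at ih
          simp [pvLoopB, ih]
  | case8 c rest ctx fw hpre hsup hsub h4 h5 hpm =>
      rw [pvLoopA, if_neg hpre, if_neg hsup, if_neg hsub, if_neg h4, if_neg h5, if_pos hpm,
          pvLoopB,
          if_neg (fun hx => hx.1.elim (fun hcc => hsup ⟨hcc, hx.2⟩) (fun hcc => hsub ⟨hcc, hx.2⟩)),
          if_neg h4, if_neg h5, if_pos ⟨hpm.1, by rw [hpm.2]; rfl⟩]
  | case9 c rest ctx fw hpre hsup hsub h4 h5 h6 ih =>
      rw [pvLoopA, if_neg hpre, if_neg hsup, if_neg hsub, if_neg h4, if_neg h5, if_neg h6, ih,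
          pvLoopB,
          if_neg (fun hx => hx.1.elim (fun hcc => hsup ⟨hcc, hx.2⟩) (fun hcc => hsub ⟨hcc, hx.2⟩)),
          if_neg h4, if_neg h5,
          if_neg (fun hx => h6 ⟨hx.1, by
            have hz := hx.2
            cases ctx with
            | nil => rfl
            | cons a t =>
                exfalso
                simp only [List.length_cons] at hz
                omega⟩)]

-- value-level unfoldings of pvSkip, one per branch
theorem pvSkip_cons_sup (c : Char) (rest : List Char)
    (h : (c = '^' ∨ c = '_') ∧ rest.head? = some '{') :
    (pvSkip (c :: rest)).1 = (pvSkip (pvSkip rest.tail).1).1 := by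
  rw [pvSkip]; simp [h]

theorem pvSkip_cons_brace (rest : List Char)
    (_h : ¬(('{' = '^' ∨ '{' = '_') ∧ rest.head? = some '{')) :
    (pvSkip ('{' :: rest)).1 = (pvSkip (pvSkip rest).1).1 := by
  rw [pvSkip]; simp

theorem pvSkip_cons_close (rest : List Char)
    (_h : ¬(('}' = '^' ∨ '}' = '_') ∧ rest.head? = some '{')) :
    (pvSkip ('}' :: rest)).1 = rest := by
  rw [pvSkip]; simp

theorem pvSkip_cons_other (c : Char) (rest : List Char)
    (h1 : ¬((c = '^' ∨ c = '_') ∧ rest.head? = some '{')) (h2 : ¬c = '{') (h3 : ¬c = '}') :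
    (pvSkip (c :: rest)).1 = (pvSkip rest).1 := by
  rw [pvSkip]; simp [h1, h2, h3]

-- inside one more group, the depth counter resumes at d exactly where pvSkip ends
theorem pvLoopB_skip : ∀ (cs : List Char) (d : Int), 0 ≤ d →
    pvLoopB cs (d + 1) = pvLoopB (pvSkip cs).1 d := by
  intro cs
  induction cs using pvSkip.induct with
  | case1 =>
      intro d hd
      rw [pvSkip, pvLoopB, pvLoopB]
  | case2 c rest hcond ih1 ih2 =>
      intro d hd
      rw [pvLoopB, if_pos hcond, ih1 (d + 1) (by omega), ih2 d hd, pvSkip_cons_sup c rest hcond]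
  | case3 rest hneg ih1 ih2 =>
      intro d hd
      rw [pvLoopB, if_neg hneg, if_pos rfl, ih1 (d + 1) (by omega), ih2 d hd,
          pvSkip_cons_brace rest hneg]
  | case4 rest h1 h2 =>
      intro d hd
      rw [pvLoopB, if_neg h1, if_neg h2, if_pos rfl, pvSkip_cons_close rest h1,
          if_pos (show d + 1 > 0 by omega), show d + 1 - 1 = d by ring]
  | case5 c rest h1 h2 h3 ih =>
      intro d hd
      rw [pvLoopB, if_neg h1, if_neg h2, if_neg h3,
          if_neg (by rintro ⟨_, hz⟩; omega), ih d hd, pvSkip_cons_other c rest h1 h2 h3]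

-- the depth counter at depth 0 computes exactly B's recursive-descent top loop
theorem pvLoopB_eq_top (cs : List Char) : pvLoopB cs 0 = pvTop cs := by
  induction cs using pvTop.induct with
  | case1 => rw [pvLoopB, pvTop]
  | case2 c rest hcond ih =>
      rw [pvLoopB, if_pos hcond, pvTop, if_pos hcond,
          pvLoopB_skip rest.tail 0 le_rfl, ih]
  | case3 rest hneg ih =>
      rw [pvLoopB, if_neg hneg, if_pos rfl, pvTop, if_neg hneg, if_pos rfl,
          pvLoopB_skip rest 0 le_rfl, ih]
  | case4 c rest h1 h2 h3 =>
      have hb : c ≠ '}' := by rintro rfl; rcases h3 with h | h <;> simp at h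
      rw [pvLoopB, if_neg h1, if_neg h2, if_neg hb, if_pos ⟨h3, rfl⟩,
          pvTop, if_neg h1, if_neg h2, if_pos h3]
  | case5 c rest h1 h2 h3 ih =>
      rw [pvTop, if_neg h1, if_neg h2, if_neg h3, ← ih]
      by_cases hb : c = '}'
      · subst hb
        rw [pvLoopB, if_neg h1, if_neg h2, if_pos rfl]
        simp
      · rw [pvLoopB, if_neg h1, if_neg h2, if_neg hb,
            if_neg (by rintro ⟨hpm, _⟩; exact h3 hpm)]

-- ===== VERDICT (by name: the statement is the Claim_ definition above) =====
theorem needs_parens_latex_py_spec : Claim_equal_needs_parens_latex_py := by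
  intro s _
  unfold Spec_needs_parens_latex_py needs_parens_latex_py needs_parens_latex_py_alt
  rw [← pvLoopB_eq_top]
  by_cases ht : PySem.Chars.strip s.toList = []
  · rw [if_pos ht, ← pvLoopB_strip s.toList 0, ht, pvLoopB]
  · rw [if_neg ht, pvLoopA_eq_loopB, ← pvLoopB_strip s.toList 0]
    rfl
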